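-- pv_equiv track=rewrite | github.com/jmazala/interview_questions | airbnb/main.py | getPool
-- ===== SOURCE A (Python) =====
-- EARTH = "+"
--
-- def getPool(terrain):
--     pool = []
--     n = len(terrain)
--
--     for col, height in enumerate(terrain):
--         for i in range(height):
--             if len(pool) < i + 1:
--                 pool.append([" "] * n)
--             pool[i][col] = EARTH
--
--     return pool
-- ===== SOURCE B (Python) =====
-- EARTH = "+"
--
-- def getPool(terrain):
--     n = len(terrain)
--     max_h = max(terrain, default=0)
--     return [[EARTH if terrain[c] > i else " " for c in range(n)]
--             for i in range(max_h)]
-- ===== Notes on version B (the rewrite author's own statement) =====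
-- stated objective: simpler
-- what changed: Instead of lazily growing the pool row list while scanning columns and mutating cells, B computes the overall max height once and builds the whole grid row-major with a per-cell comparison terrain[c] > i.
import Mathlib
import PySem

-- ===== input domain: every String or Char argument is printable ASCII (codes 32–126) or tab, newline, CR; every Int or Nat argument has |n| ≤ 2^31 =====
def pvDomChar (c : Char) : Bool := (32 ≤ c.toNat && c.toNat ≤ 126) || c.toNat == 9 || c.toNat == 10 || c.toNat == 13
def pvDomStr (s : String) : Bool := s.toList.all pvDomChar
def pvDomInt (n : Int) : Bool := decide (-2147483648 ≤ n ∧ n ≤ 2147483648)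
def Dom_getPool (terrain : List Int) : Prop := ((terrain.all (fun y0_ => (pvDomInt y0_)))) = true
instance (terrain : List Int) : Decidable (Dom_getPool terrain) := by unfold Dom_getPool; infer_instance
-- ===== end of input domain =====

-- B builds the grid row-major from the overall max height by a per-cell comparison,
-- instead of A's column scan that lazily appends rows and mutates cells (simpler decomposition).

-- ===== PORT A =====
def getPool (terrain : List Int) : List (List String) :=
  let n := terrain.length
  (PySem.List.enumerate terrain 0).foldl (fun pool ch =>
    (PySem.List.pyRange 0 ch.2 1).foldl (fun pool i =>
      let pool := if (pool.length : Int) < i + 1 then pool ++ [List.replicate n " "] else pool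
      PySem.List.pySetD pool i (PySem.List.pySetD (PySem.List.pyGetD pool i []) ch.1 "+")) pool) []

-- ===== PORT B =====
def getPool_alt (terrain : List Int) : List (List String) :=
  let n := terrain.length
  let maxH := (PySem.List.max? terrain (fun y => y)).getD 0
  (PySem.List.pyRange 0 maxH 1).map (fun i =>
    (PySem.List.pyRange 0 (n : Int) 1).map (fun c =>
      if PySem.List.pyGetD terrain c 0 > i then "+" else " "))

-- ===== PRECONDITION & SPEC =====
def Spec_getPool (terrain : List Int) (out : List (List String)) : Prop := out = getPool_alt terrain
instance (terrain : List Int) (out : List (List String)) : Decidable (Spec_getPool terrain out) := by unfold Spec_getPool; infer_instance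

-- ===== CLAIM (what is proved, stated in full; the proofs are below) =====
def Claim_equal_getPool : Prop := ∀ (terrain : List Int), Dom_getPool terrain → Spec_getPool terrain (getPool terrain)

-- ===== LEMMAS AND PROOFS =====

-- row i of the grid after the first k columns have been processed
def rowOf (t : List Int) (k i : Nat) : List String :=
  (List.range t.length).map (fun c => if c < k ∧ t.getD c 0 > (i : Int) then "+" else " ")

def gridOf (t : List Int) (k M : Nat) : List (List String) :=
  (List.range M).map (rowOf t k)

-- grid in the middle of processing column k: rows 0..H-1 of column k already marked
def rowMid (t : List Int) (k H i : Nat) : List String :=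
  (List.range t.length).map (fun c =>
    if (c < k ∧ t.getD c 0 > (i : Int)) ∨ (c = k ∧ i < H) then "+" else " ")

def gridMid (t : List Int) (k M H : Nat) : List (List String) :=
  (List.range (max M H)).map (rowMid t k H)

-- running maximum of (clamped) heights, A's final row count
def mxOf (t : List Int) : Nat := t.foldl (fun m h => max m h.toNat) 0

theorem set_map_range {α : Type} (n : Nat) (g : Nat → α) (k : Nat) (v : α) :
    ((List.range n).map g).set k v = (List.range n).map (fun c => if c = k then v else g c) := by
  apply List.ext_getElem (by simp)
  intro j h1 h2
  simp only [List.getElem_set, List.getElem_map, List.getElem_range]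
  by_cases h : j = k
  · simp [h]
  · simp [h, Ne.symm h]

theorem rowMid_congr (t : List Int) (k H H' i : Nat) (h : i < H ↔ i < H') :
    rowMid t k H i = rowMid t k H' i := by
  unfold rowMid
  apply List.map_congr_left
  intro c _
  simp only [h]

theorem rowMid_zero (t : List Int) (k i : Nat) : rowMid t k 0 i = rowOf t k i := by
  unfold rowMid rowOf
  apply List.map_congr_left
  intro c _
  simp

theorem rowMid_blank (t : List Int) (k H : Nat)
    (hM : ∀ c < k, t.getD c 0 ≤ (H : Int)) :
    rowMid t k (H + 1) H = (List.replicate t.length (" " : String)).set k "+" := by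
  apply List.ext_getElem (by simp [rowMid])
  intro j h1 h2
  simp only [rowMid, List.getElem_map, List.getElem_range, List.getElem_set,
    List.getElem_replicate]
  simp only [rowMid, List.length_map, List.length_range] at h1
  by_cases hjk : j = k
  · simp [hjk]
  · have hb : j < k → ¬ (t.getD j 0 > (H : Int)) := fun hc => by
      have := hM j hc; omega
    rw [if_neg (by omega : ¬ k = j), if_neg]
    rintro (⟨hc, hx⟩ | ⟨he, _⟩)
    · exact hb hc hx
    · exact hjk he

theorem rowMid_set (t : List Int) (k H : Nat) :
    rowMid t k (H + 1) H = (rowMid t k H H).set k "+" := by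
  unfold rowMid
  rw [set_map_range]
  apply List.map_congr_left
  intro c _
  by_cases hck : c = k
  · simp [hck]
  · simp [hck]

theorem inner_step (t : List Int) (k M : Nat)
    (hM : ∀ c < k, t.getD c 0 ≤ (M : Int)) (H : Nat) :
    (PySem.List.pyRange 0 (H : Int) 1).foldl (fun pool i =>
      let pool := if (pool.length : Int) < i + 1 then pool ++ [List.replicate t.length " "] else pool
      PySem.List.pySetD pool i (PySem.List.pySetD (PySem.List.pyGetD pool i []) (k : Int) "+"))
      (gridOf t k M) = gridMid t k M H := by
  induction H with
  | zero =>
      simp only [Nat.cast_zero, PySem.List.pyRange_one_eq_nil (le_refl 0), List.foldl_nil]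
      unfold gridOf gridMid
      simp only [Nat.max_zero]
      exact List.map_congr_left (fun i _ => (rowMid_zero t k i).symm)
  | succ H ih =>
      have hcast : ((H + 1 : Nat) : Int) = (H : Int) + 1 := by push_cast; ring
      rw [hcast, PySem.List.pyRange_one_succ_right (by positivity), List.foldl_append, ih]
      simp only [List.foldl_cons, List.foldl_nil]
      have hlen : (gridMid t k M H).length = max M H := by
        simp [gridMid]
      by_cases hMH : M ≤ H
      · -- a fresh blank row is appended, then marked at column k
        have hcond : ((gridMid t k M H).length : Int) < (H : Int) + 1 := by
          rw [hlen]; push_cast; omega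
        simp only [hcond, if_pos]
        have hget : PySem.List.pyGetD (gridMid t k M H ++ [List.replicate t.length (" " : String)])
            (H : Int) [] = List.replicate t.length " " := by
          simp only [PySem.List.pyGetD_natCast, List.getD_eq_getElem?_getD]
          rw [List.getElem?_append_right (by omega)]
          simp [hlen, Nat.max_eq_right hMH]
        rw [hget]
        simp only [PySem.List.pySetD_natCast]
        apply List.ext_getElem
        · simp [gridMid, Nat.max_eq_right hMH, Nat.max_eq_right (by omega : M ≤ H + 1)]
        · intro j h1 h2
          have hj : j < H + 1 := by
            simp only [List.length_set, List.length_append, hlen, List.length_cons,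
              List.length_nil, Nat.max_eq_right hMH] at h1
            omega
          by_cases hjH : j = H
          · subst hjH
            rw [List.getElem_set_self (by simp only [List.length_set, List.length_append, List.length_cons, List.length_nil, hlen]; omega)]
            simp only [gridMid, List.getElem_map, List.getElem_range]
            exact (rowMid_blank t k j (fun c hc => le_trans (hM c hc) (by omega))).symm
          · have hjH' : j < H := by omega
            rw [List.getElem_set_ne (by omega)]
            rw [List.getElem_append_left (by rw [hlen]; omega)]
            simp only [gridMid, List.getElem_map, List.getElem_range]
            exact rowMid_congr t k H (H + 1) j (by omega)
      · -- row H already exists: only mark column k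
        have hcond : ¬ (((gridMid t k M H).length : Int) < (H : Int) + 1) := by
          rw [hlen]; push_cast; omega
        simp only [hcond, if_false]
        have hget : PySem.List.pyGetD (gridMid t k M H) (H : Int) [] = rowMid t k H H := by
          simp only [PySem.List.pyGetD_natCast, List.getD_eq_getElem?_getD]
          rw [List.getElem?_eq_getElem (by rw [hlen]; omega)]
          simp [gridMid]
        rw [hget]
        simp only [PySem.List.pySetD_natCast]
        apply List.ext_getElem
        · simp [gridMid, Nat.max_eq_left (by omega : H ≤ M), Nat.max_eq_left (by omega : H + 1 ≤ M)]
        · intro j h1 h2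
          by_cases hjH : j = H
          · subst hjH
            rw [List.getElem_set_self (by simp only [List.length_set, hlen]; omega)]
            simp only [gridMid, List.getElem_map, List.getElem_range]
            exact (rowMid_set t k j).symm
          · rw [List.getElem_set_ne (by omega)]
            simp only [gridMid, List.getElem_map, List.getElem_range]
            exact rowMid_congr t k H (H + 1) j (by omega)

theorem gridMid_done (t : List Int) (k M : Nat) (h : Int) (hval : t.getD k 0 = h) :
    gridMid t k M h.toNat = gridOf t (k + 1) (max M h.toNat) := by
  unfold gridMid gridOf rowMid rowOf
  apply List.map_congr_left
  intro i _
  apply List.map_congr_left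
  intro c _
  by_cases hck : c = k
  · subst hck
    by_cases hi : (i : Int) < h
    · rw [if_pos (Or.inr ⟨rfl, by omega⟩), if_pos ⟨Nat.lt_succ_self c, by rw [hval]; omega⟩]
    · rw [if_neg, if_neg]
      · rintro ⟨-, hgt⟩
        rw [hval] at hgt
        omega
      · rintro (⟨hlt, -⟩ | ⟨-, hlt⟩)
        · omega
        · omega
  · have hiff : ((c < k ∧ t.getD c 0 > (i : Int)) ∨ (c = k ∧ i < h.toNat)) ↔
        (c < k + 1 ∧ t.getD c 0 > (i : Int)) := by
      constructor
      · rintro (⟨hlt, hgt⟩ | ⟨he, -⟩)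
        · exact ⟨by omega, hgt⟩
        · exact absurd he hck
      · rintro ⟨hlt, hgt⟩
        exact Or.inl ⟨by omega, hgt⟩
    simp only [hiff]

theorem outer_fold (t : List Int) : ∀ (rest : List Int) (k M : Nat),
    t.drop k = rest → (∀ c < k, t.getD c 0 ≤ (M : Int)) →
    (PySem.List.enumerate rest (k : Int)).foldl (fun pool ch =>
      (PySem.List.pyRange 0 ch.2 1).foldl (fun pool i =>
        let pool := if (pool.length : Int) < i + 1 then pool ++ [List.replicate t.length " "] else pool
        PySem.List.pySetD pool i (PySem.List.pySetD (PySem.List.pyGetD pool i []) ch.1 "+")) pool)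
      (gridOf t k M)
    = gridOf t (k + rest.length) (rest.foldl (fun m h => max m h.toNat) M) := by
  intro rest
  induction rest with
  | nil =>
      intro k M _ _
      simp [PySem.List.enumerate]
  | cons h hs ih =>
      intro k M hdrop hM
      have hk : k < t.length := by
        have := congrArg List.length hdrop
        simp only [List.length_drop, List.length_cons] at this
        omega
      have hval : t.getD k 0 = h := by
        have h0 : (t.drop k)[0]? = some h := by rw [hdrop]; rfl
        rw [List.getElem?_drop] at h0
        simp only [Nat.add_zero] at h0
        simp [List.getD_eq_getElem?_getD, h0]
      have hdrop' : t.drop (k + 1) = hs := by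
        have := congrArg List.tail hdrop
        simpa [List.tail_drop] using this
      have hM' : ∀ c < k + 1, t.getD c 0 ≤ ((max M h.toNat : Nat) : Int) := by
        intro c hc
        by_cases hck : c < k
        · exact le_trans (hM c hck) (by omega)
        · have : c = k := by omega
          subst this
          rw [hval]
          push_cast; omega
      rw [PySem.List.enumerate_cons, List.foldl_cons]
      have hrange : PySem.List.pyRange 0 h 1 = PySem.List.pyRange 0 ((h.toNat : Nat) : Int) 1 := by
        by_cases h0 : 0 ≤ h
        · rw [Int.toNat_of_nonneg h0]
        · rw [PySem.List.pyRange_one_eq_nil (by omega),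
             PySem.List.pyRange_one_eq_nil (by omega)]
      have hstep : (PySem.List.pyRange 0 h 1).foldl (fun pool i =>
          let pool := if (pool.length : Int) < i + 1 then pool ++ [List.replicate t.length " "] else pool
          PySem.List.pySetD pool i (PySem.List.pySetD (PySem.List.pyGetD pool i []) (k : Int) "+"))
          (gridOf t k M) = gridOf t (k + 1) (max M h.toNat) := by
        rw [hrange, inner_step t k M hM h.toNat]
        rw [gridMid_done t k M h hval]
      have hcast1 : (k : Int) + 1 = ((k + 1 : Nat) : Int) := by push_cast; ring
      rw [hstep, hcast1, ih (k + 1) (max M h.toNat) hdrop' hM']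
      simp only [List.length_cons, List.foldl_cons]
      congr 1
      omega

theorem foldl_natmax (xs : List Int) : ∀ (x : Int),
    xs.foldl (fun m h => max m h.toNat) x.toNat = (xs.foldl max x).toNat := by
  induction xs with
  | nil => intro x; rfl
  | cons h xs ih =>
      intro x
      simp only [List.foldl_cons]
      have : max x.toNat h.toNat = (max x h).toNat := by omega
      rw [this, ih]

theorem mx_eq (t : List Int) : mxOf t = ((PySem.List.max? t (fun y => y)).getD 0).toNat := by
  cases t with
  | nil => rfl
  | cons x xs =>
      rw [PySem.List.max?_id_cons]
      show xs.foldl (fun m h => max m h.toNat) (max 0 x.toNat) = _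
      rw [Nat.zero_max, foldl_natmax]
      rfl

theorem getPool_eq_grid (t : List Int) : getPool t = gridOf t t.length (mxOf t) := by
  have h := outer_fold t t 0 0 rfl (by intro c hc; omega)
  have h0 : gridOf t 0 0 = [] := rfl
  rw [h0, Nat.cast_zero] at h
  unfold getPool mxOf
  simpa using h

theorem alt_eq_grid (t : List Int) : getPool_alt t = gridOf t t.length (mxOf t) := by
  rw [mx_eq]
  unfold getPool_alt gridOf rowOf
  simp only [PySem.List.pyRange_one, Int.sub_zero, List.map_map]
  apply List.map_congr_left
  intro i _
  apply List.map_congr_left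
  intro c hc
  simp only [List.mem_range, Int.toNat_natCast] at hc
  simp [hc, List.getD_eq_getElem?_getD]

-- ===== VERDICT (by name: the statement is the Claim_ definition above) =====
theorem getPool_spec : Claim_equal_getPool := by
  intro t _
  unfold Spec_getPool
  rw [getPool_eq_grid, alt_eq_grid]
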